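-- pv_equiv track=rewrite | github.com/Siddhesh-Shukla/Information-Retrieval | A1. Boolean Query Model/lib/wildcard_search.py | getActualWords
-- ===== SOURCE A (Python) =====
-- def rotate(str, n):
--     """
--         Returns one rotation of str
--     """
--
--     return str[n:] + str[:n]
--
-- def getActualWords(possible_rotated_words, query):
--     """
--         Returns the list of possible words from the permuterm index
--     """
--
--     possible_words = []
--
--     for rotated_words in possible_rotated_words:
--         for i in range(len(rotated_words)):
--             if rotate(rotated_words,i).endswith('$'):
--                 chopped_query = query.split("*")
--                 if len(chopped_query) == 1:
--                     if chopped_query == rotate(rotated_words,i)[:-1]: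
--                         possible_words.append(rotate(rotated_words,i)[:-1])
--                 else:
--                     if rotate(rotated_words,i)[:-1].startswith(chopped_query[0]) and rotate(rotated_words,i)[:-1].endswith(chopped_query[1]):
--                         possible_words.append(rotate(rotated_words,i)[:-1])
--
--                 break
--     return possible_words
-- ===== SOURCE B (Python) =====
-- def _canon(rotated):
--     """Undo the permuterm rotation: the unique word w with some rotation of
--     rotated equal to w + '$' (picking the rotation A's scan would pick).
--     Returns None if rotated contains no '$'."""
--     if rotated.endswith('$'):
--         return rotated[:-1]
--     j = rotated.find('$')
--     if j == -1:
--         return None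
--     return rotated[j + 1:] + rotated[:j]
--
-- def getActualWords(possible_rotated_words, query):
--     parts = query.split('*')
--     possible_words = []
--     for rotated in possible_rotated_words:
--         word = _canon(rotated)
--         if word is None:
--             continue
--         if len(parts) == 1:
--             if word == query:
--                 possible_words.append(word)
--         elif word.startswith(parts[0]) and word.endswith(parts[1]):
--             possible_words.append(word)
--     return possible_words
-- ===== Notes on version B (the rewrite author's own statement) =====
-- stated objective: faster
-- what changed: Instead of trying every rotation of each word (quadratic per word) and breaking at the first one ending in '$', B locates the '$' with one find/endswith and builds the single de-rotated word directly, then filters; B also fixes A's no-wildcard branch, which compares the list query.split('*') against a string and hence never matches.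
-- intended difference: On queries without '*' whose exact word (rotation minus '$') occurs in the list, A returns [] because it compares the list chopped_query with a string (always False), while B returns the matching words, the evidently intended exact-match behaviour. — e.g. on getActualWords(["hello$"], "hello"): A returns [], B returns ["hello"]
import Mathlib
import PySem

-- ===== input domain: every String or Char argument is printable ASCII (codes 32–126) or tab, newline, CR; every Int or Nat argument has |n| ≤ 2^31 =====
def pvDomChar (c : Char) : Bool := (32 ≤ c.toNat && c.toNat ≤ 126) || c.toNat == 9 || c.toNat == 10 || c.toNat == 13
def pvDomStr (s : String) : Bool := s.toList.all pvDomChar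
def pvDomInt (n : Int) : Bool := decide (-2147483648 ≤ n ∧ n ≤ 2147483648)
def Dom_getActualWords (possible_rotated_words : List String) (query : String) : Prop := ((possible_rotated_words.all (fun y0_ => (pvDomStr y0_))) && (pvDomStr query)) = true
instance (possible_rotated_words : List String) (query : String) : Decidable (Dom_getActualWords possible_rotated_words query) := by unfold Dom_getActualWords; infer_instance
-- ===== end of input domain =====

-- B replaces A's per-word scan over all rotations (quadratic per word) by one direct
-- de-rotation at the '$' (linear per word), and fixes A's no-wildcard branch, which
-- compares the list query.split('*') with a string and therefore never matches (D_ below).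

-- ===== PORT A =====
-- rotate(str, n) = str[n:] + str[:n]
def pvRotate (s : List Char) (n : Int) : List Char :=
  PySem.List.slice s (some n) none ++ PySem.List.slice s none (some n)

-- A's inner 'for i in range(len(rotated_words)): … break' loop
def pvASearch (w q : List Char) (acc : List String) : List Int → List String
  | [] => acc
  | i :: rest =>
    if PySem.Chars.endswith (pvRotate w i) ['$'] then
      let chopped := PySem.Chars.splitOn q ['*']
      if chopped.length = 1 then
        -- Python: 'chopped_query == rotate(...)[:-1]' compares a LIST with a str: always False
        acc
      else
        if PySem.Chars.startswith (PySem.List.slice (pvRotate w i) none (some (-1))) (PySem.List.pyGetD chopped 0 [])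
            && PySem.Chars.endswith (PySem.List.slice (pvRotate w i) none (some (-1))) (PySem.List.pyGetD chopped 1 []) then
          acc ++ [String.ofList (PySem.List.slice (pvRotate w i) none (some (-1)))]
        else acc
    else pvASearch w q acc rest

def getActualWords (possible_rotated_words : List String) (query : String) : List String :=
  possible_rotated_words.foldl
    (fun acc rw => pvASearch rw.toList query.toList acc
      (PySem.List.pyRange 0 (PySem.Str.len rw) 1)) []

-- ===== PORT B =====
-- _canon(rotated): undo the permuterm rotation; none if no '$'
def pvCanon (w : List Char) : Option (List Char) :=
  if PySem.Chars.endswith w ['$'] then some (PySem.List.slice w none (some (-1)))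
  else
    let j := PySem.Chars.find w ['$']
    if j = -1 then none
    else some (PySem.List.slice w (some (j + 1)) none ++ PySem.List.slice w none (some j))

def getActualWords_alt (possible_rotated_words : List String) (query : String) : List String :=
  let parts := PySem.Chars.splitOn query.toList ['*']
  possible_rotated_words.foldl
    (fun acc rw =>
      match pvCanon rw.toList with
      | none => acc
      | some word =>
        if parts.length = 1 then
          if word = query.toList then acc ++ [String.ofList word] else acc
        else
          if PySem.Chars.startswith word (PySem.List.pyGetD parts 0 [])
              && PySem.Chars.endswith word (PySem.List.pyGetD parts 1 []) then
            acc ++ [String.ofList word]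
          else acc) []

-- ===== PRECONDITION & SPEC =====
-- On queries without '*' whose exact word (a '$'-rotation of a listed entry, minus the '$')
-- occurs in the list, A returns [] (it compares the list query.split('*') with a string,
-- which is always False), while B returns those matching words — the intended exact match.
def D_getActualWords (possible_rotated_words : List String) (query : String) : Prop :=
  (PySem.Chars.splitOn query.toList ['*']).length = 1 ∧
    ∃ w ∈ possible_rotated_words, ∃ i ∈ PySem.List.pyRange 0 (PySem.Str.len w) 1,
      PySem.Chars.endswith (pvRotate w.toList i) ['$'] = true ∧
      PySem.List.slice (pvRotate w.toList i) none (some (-1)) = query.toList ∧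
      ∀ k ∈ PySem.List.pyRange 0 i 1, PySem.Chars.endswith (pvRotate w.toList k) ['$'] = false

instance (possible_rotated_words : List String) (query : String) : Decidable (D_getActualWords possible_rotated_words query) := by
  unfold D_getActualWords; infer_instance

def Spec_getActualWords (possible_rotated_words : List String) (query : String) (out : List String) : Prop :=
  ¬ D_getActualWords possible_rotated_words query → out = getActualWords_alt possible_rotated_words query
instance (possible_rotated_words : List String) (query : String) (out : List String) : Decidable (Spec_getActualWords possible_rotated_words query out) := by
  unfold Spec_getActualWords; infer_instance

def pvDiffWitness_getActualWords : List String × String := (["hello$"], "hello")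
def pvDiffWitnessOut_getActualWords : (List String) × (List String) := ([], ["hello"])

-- ===== CLAIM (what is proved, stated in full; the proofs are below) =====
def Claim_unchanged_getActualWords : Prop := ∀ (possible_rotated_words : List String) (query : String), Dom_getActualWords possible_rotated_words query → Spec_getActualWords possible_rotated_words query (getActualWords possible_rotated_words query)
def Claim_changed_getActualWords : Prop := Dom_getActualWords (pvDiffWitness_getActualWords.1) (pvDiffWitness_getActualWords.2) ∧ D_getActualWords (pvDiffWitness_getActualWords.1) (pvDiffWitness_getActualWords.2) ∧ getActualWords (pvDiffWitness_getActualWords.1) (pvDiffWitness_getActualWords.2) = pvDiffWitnessOut_getActualWords.1 ∧ getActualWords_alt (pvDiffWitness_getActualWords.1) (pvDiffWitness_getActualWords.2) = pvDiffWitnessOut_getActualWords.2 ∧ pvDiffWitnessOut_getActualWords.1 ≠ pvDiffWitnessOut_getActualWords.2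
def Claim_exact_getActualWords : Prop := ∀ (possible_rotated_words : List String) (query : String), Dom_getActualWords possible_rotated_words query → D_getActualWords possible_rotated_words query → getActualWords possible_rotated_words query ≠ getActualWords_alt possible_rotated_words query

-- ===== LEMMAS AND PROOFS =====

theorem pv_endswith_single (l : List Char) (c : Char) :
    PySem.Chars.endswith l [c] = (l.getLast? == some c) := by
  rcases List.eq_nil_or_concat l with rfl | ⟨t, a, rfl⟩
  · simp [PySem.Chars.endswith]
  · simp only [List.concat_eq_append]
    rw [Bool.eq_iff_iff]
    constructor
    · intro h
      rcases (PySem.Chars.endswith_iff _ _).1 h with ⟨u, hu⟩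
      have hac : a = c := by
        have := congrArg List.getLast? hu
        simpa using this.symm
      simp [hac]
    · intro h
      simp only [List.getLast?_concat] at h
      have : a = c := by simpa using h
      subst this
      exact (PySem.Chars.endswith_iff _ _).2 ⟨t, rfl⟩

theorem pv_rotate_nonneg (w : List Char) (i : Int) (hi : 0 ≤ i) :
    pvRotate w i = w.drop i.toNat ++ w.take i.toNat := by
  simp [pvRotate, PySem.List.slice_from _ hi, PySem.List.slice_to _ hi]

theorem pv_rotate_zero (w : List Char) : pvRotate w 0 = w := by
  rw [pv_rotate_nonneg w 0 le_rfl]; simp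

theorem pv_getLast?_take (w : List Char) (m : Nat) (hm : m < w.length) :
    (w.take (m + 1)).getLast? = some w[m] := by
  rw [List.take_add_one, List.getElem?_eq_getElem hm, Option.toList_some, List.getLast?_concat]

-- if w has no '$', no rotation ends in '$'
theorem pvAllFail_of_find_neg (w : List Char)
    (hfind : PySem.Chars.find w ['$'] = -1) :
    ∀ i ∈ PySem.List.pyRange 0 (w.length : Int) 1,
      PySem.Chars.endswith (pvRotate w i) ['$'] = false := by
  have hnomem : '$' ∉ w := by
    intro hmem
    rcases List.append_of_mem hmem with ⟨s, t, rfl⟩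
    exact (PySem.Chars.find_eq_neg_one_iff _ _).1 hfind ⟨s, t, by simp⟩
  intro i hi
  have hi0 : 0 ≤ i := ((PySem.List.mem_pyRange_one).1 hi).1
  rw [pv_rotate_nonneg w i hi0, pv_endswith_single]
  rw [beq_eq_false_iff_ne]
  intro hlast
  have : '$' ∈ w.drop i.toNat ++ w.take i.toNat := List.mem_of_getLast? hlast
  simp only [List.mem_append] at this
  rcases this with h | h
  · exact hnomem (List.mem_of_mem_drop h)
  · exact hnomem (List.mem_of_mem_take h)

-- w does not end in '$' but contains one at index j = find w '$': facts about the hit at j+1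
theorem pvFind_branch (w : List Char)
    (hend : PySem.Chars.endswith w ['$'] = false)
    (hfind : PySem.Chars.find w ['$'] ≠ -1) :
    0 ≤ PySem.Chars.find w ['$'] ∧
    PySem.Chars.find w ['$'] + 1 < (w.length : Int) ∧
    (∀ i ∈ PySem.List.pyRange 0 (PySem.Chars.find w ['$'] + 1) 1,
      PySem.Chars.endswith (pvRotate w i) ['$'] = false) ∧
    PySem.Chars.endswith (pvRotate w (PySem.Chars.find w ['$'] + 1)) ['$'] = true ∧
    PySem.List.slice (pvRotate w (PySem.Chars.find w ['$'] + 1)) none (some (-1)) =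
      w.drop ((PySem.Chars.find w ['$']).toNat + 1) ++ w.take (PySem.Chars.find w ['$']).toNat ∧
    pvCanon w = some (w.drop ((PySem.Chars.find w ['$']).toNat + 1) ++ w.take (PySem.Chars.find w ['$']).toNat) := by
  have hfnn : 0 ≤ PySem.Chars.find w ['$'] := by
    have := PySem.Chars.neg_one_le_find w ['$']
    omega
  obtain ⟨hpre, hfirst⟩ := PySem.Chars.find_spec (s := w) (sub := ['$']) hfnn
  set j : Int := PySem.Chars.find w ['$'] with hj
  set jn : Nat := j.toNat with hjn
  obtain ⟨t, ht⟩ := hpre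
  have hjlt : jn < w.length := by
    have := congrArg List.length ht
    simp at this
    omega
  have hwj : w[jn] = '$' := by
    have := congrArg (fun l => l.head?) ht
    simp only [List.head?_append, List.head?_cons, Option.some_or] at this
    rw [List.head?_drop, List.getElem?_eq_getElem hjlt] at this
    simpa using this.symm
  have hne_last : jn ≠ w.length - 1 := by
    intro hlast
    have hw : w ≠ [] := by rintro rfl; simp at hjlt
    have hgl : w.getLast? = some '$' := by
      rw [List.getLast?_eq_getElem?, List.getElem?_eq_getElem (by omega)]
      have he : w.length - 1 = jn := hlast.symm
      simp [he, hwj]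
    rw [pv_endswith_single, hgl] at hend
    simp at hend
  have hj1lt : jn + 1 < w.length := by omega
  refine ⟨hfnn, by omega, ?_, ?_, ?_, ?_⟩
  · intro i hi
    obtain ⟨hi0, hilt⟩ := (PySem.List.mem_pyRange_one).1 hi
    rw [pv_rotate_nonneg w i hi0, pv_endswith_single, beq_eq_false_iff_ne]
    intro hlast
    rcases Nat.eq_zero_or_pos i.toNat with hz | hpos
    · -- i = 0: the rotation is w, which does not end in '$'
      rw [hz] at hlast
      simp only [List.drop_zero, List.take_zero, List.append_nil] at hlast
      rw [pv_endswith_single, hlast] at hend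
      simp at hend
    · -- the rotation's last char is w[i.toNat - 1], strictly before the first '$'
      have hitn : i.toNat ≤ jn := by omega
      have htk : w.take i.toNat ≠ [] := by
        intro hnil
        rcases (List.take_eq_nil_iff).1 hnil with h | h
        · omega
        · subst h; simp at hjlt
      rw [List.getLast?_append_of_ne_nil _ htk] at hlast
      obtain ⟨m, hm⟩ : ∃ m, i.toNat = m + 1 := ⟨i.toNat - 1, by omega⟩
      rw [hm, pv_getLast?_take w m (by omega)] at hlast
      apply hfirst m (by omega)
      rw [List.drop_eq_getElem_cons (by omega : m < w.length)]
      have hwm : w[m] = '$' := by simpa using hlast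
      rw [hwm]
      exact ⟨w.drop (m+1), rfl⟩
  · have hj1 : (j + 1).toNat = jn + 1 := by omega
    have htk1 : w.take (jn + 1) ≠ [] := by
      intro hnil
      rcases (List.take_eq_nil_iff).1 hnil with h | h
      · omega
      · subst h; simp at hjlt
    rw [pv_rotate_nonneg w (j+1) (by omega), hj1, pv_endswith_single,
      List.getLast?_append_of_ne_nil _ htk1, pv_getLast?_take w jn hjlt, hwj]
    simp
  · have hj1 : (j + 1).toNat = jn + 1 := by omega
    have htk1 : w.take (jn + 1) ≠ [] := by
      intro hnil
      rcases (List.take_eq_nil_iff).1 hnil with h | h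
      · omega
      · subst h; simp at hjlt
    rw [pv_rotate_nonneg w (j+1) (by omega), hj1, PySem.List.slice_to_neg_one,
      List.dropLast_append_of_ne_nil htk1]
    congr 1
    rw [List.dropLast_eq_take, List.take_take]
    congr 1
    rw [List.length_take]
    omega
  · rw [pvCanon]
    simp only [hend, Bool.false_eq_true, if_false, ← hj, hfind, if_false]
    rw [PySem.List.slice_from _ (by omega), PySem.List.slice_to _ (by omega)]
    have hj1 : (j + 1).toNat = jn + 1 := by omega
    rw [hj1]

-- pvCanon characterised by A's vocabulary: the FIRST rotation ending in '$', minus the '$'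
theorem pvCanon_char (w u : List Char) :
    (∃ i ∈ PySem.List.pyRange 0 (w.length : Int) 1,
      PySem.Chars.endswith (pvRotate w i) ['$'] = true ∧
      PySem.List.slice (pvRotate w i) none (some (-1)) = u ∧
      ∀ k ∈ PySem.List.pyRange 0 i 1, PySem.Chars.endswith (pvRotate w k) ['$'] = false)
    ↔ pvCanon w = some u := by
  constructor
  · rintro ⟨i, hiR, hE, hS, hMin⟩
    obtain ⟨hi0, hilt⟩ := (PySem.List.mem_pyRange_one).1 hiR
    by_cases hend : PySem.Chars.endswith w ['$'] = true
    · have hiz : i = 0 := by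
        by_contra hne
        have h0 : (0 : Int) ∈ PySem.List.pyRange 0 i 1 :=
          (PySem.List.mem_pyRange_one).2 ⟨le_rfl, by omega⟩
        have := hMin 0 h0
        rw [pv_rotate_zero] at this
        rw [this] at hend
        simp at hend
      subst hiz
      rw [pv_rotate_zero] at hS
      rw [pvCanon]
      simp [hend, hS]
    · rw [Bool.not_eq_true] at hend
      by_cases hfind : PySem.Chars.find w ['$'] = -1
      · exfalso
        have := pvAllFail_of_find_neg w hfind i hiR
        rw [hE] at this
        simp at this
      · obtain ⟨hfnn, hj1lt, hfail, hhit, hword, hcanon⟩ := pvFind_branch w hend hfind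
        have hieq : i = PySem.Chars.find w ['$'] + 1 := by
          rcases lt_trichotomy i (PySem.Chars.find w ['$'] + 1) with h | h | h
          · exfalso
            have := hfail i ((PySem.List.mem_pyRange_one).2 ⟨hi0, h⟩)
            rw [hE] at this
            simp at this
          · exact h
          · exfalso
            have hk : PySem.Chars.find w ['$'] + 1 ∈ PySem.List.pyRange 0 i 1 :=
              (PySem.List.mem_pyRange_one).2 ⟨by omega, h⟩
            have := hMin _ hk
            rw [hhit] at this
            simp at this
        rw [hieq, hword] at hS
        rw [hcanon, hS]
  · intro hcanon
    by_cases hend : PySem.Chars.endswith w ['$'] = true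
    · have hw : w ≠ [] := by
        rintro rfl
        simp [pv_endswith_single] at hend
      have hlen : (0 : Int) < (w.length : Int) := by
        have := List.length_pos_iff.mpr hw
        exact_mod_cast this
      refine ⟨0, (PySem.List.mem_pyRange_one).2 ⟨le_rfl, hlen⟩, ?_, ?_, ?_⟩
      · rw [pv_rotate_zero]; exact hend
      · rw [pv_rotate_zero]
        rw [pvCanon] at hcanon
        simp only [hend, if_true, Option.some.injEq] at hcanon
        exact hcanon
      · intro k hk
        exfalso
        have := (PySem.List.mem_pyRange_one).1 hk
        omega
    · rw [Bool.not_eq_true] at hend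
      by_cases hfind : PySem.Chars.find w ['$'] = -1
      · exfalso
        rw [pvCanon] at hcanon
        simp [hend, hfind] at hcanon
      · obtain ⟨hfnn, hj1lt, hfail, hhit, hword, hcanon'⟩ := pvFind_branch w hend hfind
        have hu : u = w.drop ((PySem.Chars.find w ['$']).toNat + 1) ++ w.take (PySem.Chars.find w ['$']).toNat := by
          rw [hcanon] at hcanon'
          exact Option.some.inj hcanon'
        refine ⟨PySem.Chars.find w ['$'] + 1,
          (PySem.List.mem_pyRange_one).2 ⟨by omega, hj1lt⟩, hhit, ?_, hfail⟩
        rw [hword, hu]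

-- the accumulator can be pulled out of A's inner loop
theorem pvASearch_acc (w q : List Char) (l : List Int) (acc : List String) :
    pvASearch w q acc l = acc ++ pvASearch w q [] l := by
  induction l generalizing acc with
  | nil => simp [pvASearch]
  | cons i rest ih =>
    simp only [pvASearch]
    split_ifs with h1 h2 h3
    · simp
    · simp
    · simp
    · rw [ih acc, ih []]

-- a prefix of indices whose rotations do not end in '$' is skipped
theorem pvASearch_skip (w q : List Char) (l l' : List Int) (acc : List String)
    (h : ∀ i ∈ l, PySem.Chars.endswith (pvRotate w i) ['$'] = false) :
    pvASearch w q acc (l ++ l') = pvASearch w q acc l' := by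
  induction l with
  | nil => simp
  | cons i rest ih =>
    have hi := h i (by simp)
    simp only [List.cons_append, pvASearch, hi, Bool.false_eq_true, if_false]
    exact ih (fun j hj => h j (by simp [hj]))

-- the per-word contribution of A's inner loop, characterised via pvCanon
theorem pvASearch_eq_canon (w q : List Char) :
    pvASearch w q [] (PySem.List.pyRange 0 (w.length : Int) 1) =
      (match pvCanon w with
       | none => []
       | some word =>
         let chopped := PySem.Chars.splitOn q ['*']
         if chopped.length = 1 then []
         else if PySem.Chars.startswith word (PySem.List.pyGetD chopped 0 [])
             && PySem.Chars.endswith word (PySem.List.pyGetD chopped 1 []) then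
           [String.ofList word]
         else []) := by
  by_cases hend : PySem.Chars.endswith w ['$'] = true
  · -- w ends with '$': i = 0 fires immediately, the rotation is w itself
    have hw : w ≠ [] := by
      rintro rfl
      simp [pv_endswith_single] at hend
    have hlen : (0 : Int) < (w.length : Int) := by
      have := List.length_pos_iff.mpr hw
      exact_mod_cast this
    rw [PySem.List.pyRange_one_cons hlen]
    simp only [pvASearch, pv_rotate_zero, hend, if_true, pvCanon]
    rfl
  · rw [Bool.not_eq_true] at hend
    by_cases hfind : PySem.Chars.find w ['$'] = -1
    · -- no '$' anywhere: every rotation fails, the loop falls through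
      have := pvASearch_skip w q (PySem.List.pyRange 0 (w.length : Int) 1) [] []
        (pvAllFail_of_find_neg w hfind)
      simp only [List.append_nil] at this
      rw [this]
      simp [pvASearch, pvCanon, hend, hfind]
    · -- '$' first occurs at index j, not last: i = j+1 is the first hit
      obtain ⟨hfnn, hj1lt, hfail, hhit, hword, hcanon⟩ := pvFind_branch w hend hfind
      have hsplit : PySem.List.pyRange 0 (w.length : Int) 1 =
          PySem.List.pyRange 0 (PySem.Chars.find w ['$'] + 1) 1 ++
            PySem.List.pyRange (PySem.Chars.find w ['$'] + 1) (w.length : Int) 1 := by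
        apply PySem.List.pyRange_one_append
        · omega
        · omega
      rw [hsplit, pvASearch_skip w q _ _ [] hfail,
        PySem.List.pyRange_one_cons (by omega : PySem.Chars.find w ['$'] + 1 < (w.length : Int))]
      simp only [pvASearch, hhit, if_true, hword, hcanon]
      simp

-- per-word contributions, as functions (used only by the proofs)
def pvGA (q : List Char) (rw : String) : List String :=
  match pvCanon rw.toList with
  | none => []
  | some word =>
    let chopped := PySem.Chars.splitOn q ['*']
    if chopped.length = 1 then []
    else if PySem.Chars.startswith word (PySem.List.pyGetD chopped 0 [])
        && PySem.Chars.endswith word (PySem.List.pyGetD chopped 1 []) then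
      [String.ofList word]
    else []

def pvGB (q : List Char) (rw : String) : List String :=
  match pvCanon rw.toList with
  | none => []
  | some word =>
    if (PySem.Chars.splitOn q ['*']).length = 1 then
      if word = q then [String.ofList word] else []
    else if PySem.Chars.startswith word (PySem.List.pyGetD (PySem.Chars.splitOn q ['*']) 0 [])
        && PySem.Chars.endswith word (PySem.List.pyGetD (PySem.Chars.splitOn q ['*']) 1 []) then
      [String.ofList word]
    else []

theorem pv_len_bridge (rw : String) : PySem.Str.len rw = (rw.toList.length : Int) := by
  simp

-- D_ restated through pvCanon
theorem pvD_iff (pws : List String) (q : String) :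
    D_getActualWords pws q ↔
      ((PySem.Chars.splitOn q.toList ['*']).length = 1 ∧
        ∃ w ∈ pws, pvCanon w.toList = some q.toList) := by
  rw [D_getActualWords]
  constructor
  · rintro ⟨hlen, w, hw, hex⟩
    refine ⟨hlen, w, hw, (pvCanon_char w.toList q.toList).1 ?_⟩
    rw [pv_len_bridge] at hex
    exact hex
  · rintro ⟨hlen, w, hw, hcanon⟩
    refine ⟨hlen, w, hw, ?_⟩
    rw [pv_len_bridge]
    exact (pvCanon_char w.toList q.toList).2 hcanon

theorem pvA_flat (pws : List String) (q : String) :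
    getActualWords pws q = pws.flatMap (pvGA q.toList) := by
  rw [getActualWords]
  have h1 := PySem.List.foldl_congr_mem
    (l := pws) (init := ([] : List String))
    (f := fun (acc : List String) rw => pvASearch rw.toList q.toList acc
      (PySem.List.pyRange 0 (PySem.Str.len rw) 1))
    (g := fun (acc : List String) rw => acc ++ pvGA q.toList rw)
    (by
      intro acc rw _
      dsimp only
      rw [pv_len_bridge, pvASearch_acc, pvASearch_eq_canon, pvGA])
  rw [h1, PySem.List.foldl_append_eq_flatMap]
  simp

theorem pvB_flat (pws : List String) (q : String) :
    getActualWords_alt pws q = pws.flatMap (pvGB q.toList) := by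
  rw [getActualWords_alt]
  have h1 := PySem.List.foldl_congr_mem
    (l := pws) (init := ([] : List String))
    (f := fun (acc : List String) rw =>
      match pvCanon rw.toList with
      | none => acc
      | some word =>
        if (PySem.Chars.splitOn q.toList ['*']).length = 1 then
          if word = q.toList then acc ++ [String.ofList word] else acc
        else
          if PySem.Chars.startswith word (PySem.List.pyGetD (PySem.Chars.splitOn q.toList ['*']) 0 [])
              && PySem.Chars.endswith word (PySem.List.pyGetD (PySem.Chars.splitOn q.toList ['*']) 1 []) then
            acc ++ [String.ofList word]
          else acc)
    (g := fun (acc : List String) rw => acc ++ pvGB q.toList rw)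
    (by
      intro acc rw _
      dsimp only
      rcases h : pvCanon rw.toList with _ | word
      · simp [pvGB, h]
      · simp only [pvGB, h]
        split_ifs <;> simp)
  rw [h1, PySem.List.foldl_append_eq_flatMap]
  simp

-- ===== VERDICT (by name: the statement is the Claim_ definition above) =====
theorem getActualWords_spec : Claim_unchanged_getActualWords := by
  intro pws q _ hnD
  rw [pvD_iff] at hnD
  show getActualWords pws q = getActualWords_alt pws q
  rw [pvA_flat, pvB_flat]
  apply List.flatMap_congr
  intro rw hmem
  rcases h : pvCanon rw.toList with _ | word
  · simp [pvGA, pvGB, h]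
  · by_cases hlen : (PySem.Chars.splitOn q.toList ['*']).length = 1
    · have hne : word ≠ q.toList := by
        intro he
        exact hnD ⟨hlen, rw, hmem, by rw [h, he]⟩
      simp [pvGA, pvGB, h, hlen, hne]
    · simp [pvGA, pvGB, h, hlen]

theorem getActualWords_changed : Claim_changed_getActualWords := by
  unfold Claim_changed_getActualWords; decide

theorem getActualWords_tight : Claim_exact_getActualWords := by
  intro pws q _ hD
  rw [pvD_iff] at hD
  obtain ⟨hlen, w, hw, hcanon⟩ := hD
  have hA : getActualWords pws q = [] := by
    rw [pvA_flat]
    apply List.flatMap_eq_nil_iff.2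
    intro rw _
    rcases h : pvCanon rw.toList with _ | word
    · simp [pvGA, h]
    · simp [pvGA, h, hlen]
  have hB : String.ofList q.toList ∈ getActualWords_alt pws q := by
    rw [pvB_flat]
    apply List.mem_flatMap.2
    exact ⟨w, hw, by simp [pvGB, hcanon, hlen]⟩
  rw [hA]
  intro he
  rw [← he] at hB
  simp at hB
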